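-- pv_equiv track=rewrite | github.com/robmcmullen/peppy | peppy/lib/stcspellcheckmixin.py | spellFindNextWord
-- ===== SOURCE A (Python) =====
-- def spellFindNextWord(utext, index, length):
--     """Find the next valid word to check.
--
--     Designed to be overridden in subclasses, this method takes a starting
--     position in an array of text and returns a tuple indicating the next
--     valid word in the string.
--
--     @param utext: array of unicode chars
--     @param i: starting index within the array to search
--     @param length: length of the text
--     @return: tuple indicating the word start and end indexes, or (-1, -1)
--     indicating that the end of the array was reached and no word was found
--     """
--     while index < length:
--         if utext[index].isalpha():
--             end = index + 1
--             while end < length and utext[end].isalpha():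
--                 end += 1
--             return (index, end)
--         index += 1
--     return (-1, -1)
-- ===== SOURCE B (Python) =====
-- def spellFindNextWord(utext, index, length):
--     start = None
--     for i in range(index, length):
--         if utext[i].isalpha():
--             if start is None:
--                 start = i
--         elif start is not None:
--             return (start, i)
--     return (-1, -1) if start is None else (start, length)
-- ===== Notes on version B (the rewrite author's own statement) =====
-- stated objective: simpler
-- what changed: Replaced A's nested loops (outer scan for a word start, inner scan for its end) by one flat single-pass state machine over range(index, length) that carries the word start and returns as soon as the word ends.
import Mathlib
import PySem

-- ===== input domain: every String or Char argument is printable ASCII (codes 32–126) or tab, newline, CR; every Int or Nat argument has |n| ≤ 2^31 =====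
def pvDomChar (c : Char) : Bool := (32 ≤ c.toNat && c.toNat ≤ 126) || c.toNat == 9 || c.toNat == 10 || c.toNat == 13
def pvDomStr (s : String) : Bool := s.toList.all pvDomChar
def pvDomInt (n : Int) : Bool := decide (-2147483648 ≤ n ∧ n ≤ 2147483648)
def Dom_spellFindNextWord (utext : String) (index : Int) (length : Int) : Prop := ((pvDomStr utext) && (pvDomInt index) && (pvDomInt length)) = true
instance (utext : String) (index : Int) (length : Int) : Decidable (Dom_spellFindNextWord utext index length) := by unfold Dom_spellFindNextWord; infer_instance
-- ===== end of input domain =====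

-- B replaces A's nested word-start/word-end loops by one flat single-pass state machine (objective: simpler).

-- ===== PORT A =====
-- utext[i].isalpha() (both Pythons): Python indexing via pyGet?, Python str.isalpha via PySem.Chars.isalpha
def pvAlphaAt (cs : List Char) (i : Int) : Bool :=
  match PySem.List.pyGet? cs i with
  | some c => PySem.Chars.isalpha c
  | none => false

-- A's inner `while end < length and utext[end].isalpha(): end += 1`
def pvFindEnd (cs : List Char) (length : Int) (e : Int) : Nat → Int
  | 0 => e
  | f+1 => if e < length && pvAlphaAt cs e then pvFindEnd cs length (e+1) f else e

-- A's outer `while index < length` loop (fuel = remaining iterations)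
def pvScanA (cs : List Char) (length : Int) (index : Int) : Nat → Int × Int
  | 0 => (-1, -1)
  | f+1 =>
    if index < length then
      if pvAlphaAt cs index then (index, pvFindEnd cs length (index+1) f)
      else pvScanA cs length (index+1) f
    else (-1, -1)

def spellFindNextWord (utext : String) (index : Int) (length : Int) : Int × Int :=
  pvScanA utext.toList length index (length - index).toNat

-- ===== PORT B =====
-- B's single `for i in range(index, length)` pass; `start` is None until a word begins
def pvScanB (cs : List Char) (length : Int) (i : Int) (start : Option Int) : Nat → Int × Int
  | 0 => match start with
         | some s => (s, length)
         | none => (-1, -1)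
  | f+1 =>
    if i < length then
      if pvAlphaAt cs i then
        pvScanB cs length (i+1) (match start with | none => some i | some s => some s) f
      else
        match start with
        | some s => (s, i)
        | none => pvScanB cs length (i+1) none f
    else
      match start with
      | some s => (s, length)
      | none => (-1, -1)

def spellFindNextWord_alt (utext : String) (index : Int) (length : Int) : Int × Int :=
  pvScanB utext.toList length index none (length - index).toNat

-- ===== PRECONDITION & SPEC =====
-- Pre_ holds exactly where Python A returns: either the loop is never entered (length ≤ index),
-- or the start is a valid (possibly negative, wrapping) position and either every scanned position
-- is inside the text (length ≤ len) or the scan finds a word ending strictly before the text end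
-- (an alphabetic position followed by a later non-alphabetic one below len); outside Pre_ A raises IndexError.
def Pre_spellFindNextWord (utext : String) (index : Int) (length : Int) : Prop :=
  length ≤ index ∨
  (-(PySem.Str.len utext) ≤ index ∧
    (length ≤ PySem.Str.len utext ∨
      ∃ p ∈ PySem.List.pyRange index (PySem.Str.len utext) 1,
        pvAlphaAt utext.toList p = true ∧
        ∃ q ∈ PySem.List.pyRange (p + 1) (PySem.Str.len utext) 1,
          pvAlphaAt utext.toList q = false))
instance (utext : String) (index : Int) (length : Int) : Decidable (Pre_spellFindNextWord utext index length) := by unfold Pre_spellFindNextWord; infer_instance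
def pvWitness_spellFindNextWord : String × Int × Int := ("a b", 0, 3)

def Spec_spellFindNextWord (utext : String) (index : Int) (length : Int) (out : Int × Int) : Prop := out = spellFindNextWord_alt utext index length
instance (utext : String) (index : Int) (length : Int) (out : Int × Int) : Decidable (Spec_spellFindNextWord utext index length out) := by unfold Spec_spellFindNextWord; infer_instance

-- ===== CLAIM (what is proved, stated in full; the proofs are below) =====
def Claim_equal_spellFindNextWord : Prop := ∀ (utext : String) (index : Int) (length : Int), Dom_spellFindNextWord utext index length → Pre_spellFindNextWord utext index length → Spec_spellFindNextWord utext index length (spellFindNextWord utext index length)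

-- ===== LEMMAS AND PROOFS =====

-- once a word has started at s, B's remaining pass computes exactly A's inner end-scan
lemma pvScanB_some (cs : List Char) (length : Int) :
    ∀ (f : Nat) (e s : Int), e ≤ length → f = (length - e).toNat →
      pvScanB cs length e (some s) f = (s, pvFindEnd cs length e f) := by
  intro f
  induction f with
  | zero =>
    intro e s he hf
    have : e = length := by omega
    simp [pvScanB, pvFindEnd, this]
  | succ f ih =>
    intro e s he hf
    have hel : e < length := by omega
    by_cases ha : pvAlphaAt cs e = true
    · simp [pvScanB, pvFindEnd, hel, ha]
      exact ih (e+1) s (by omega) (by omega)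
    · simp [pvScanB, pvFindEnd, hel, ha]

-- before any word has started, B's pass computes exactly A's outer scan
lemma pvScanB_none (cs : List Char) (length : Int) :
    ∀ (f : Nat) (i : Int), i ≤ length → f = (length - i).toNat →
      pvScanB cs length i none f = pvScanA cs length i f := by
  intro f
  induction f with
  | zero =>
    intro i hi hf
    simp [pvScanB, pvScanA]
  | succ f ih =>
    intro i hi hf
    have hil : i < length := by omega
    by_cases ha : pvAlphaAt cs i = true
    · simp [pvScanB, pvScanA, hil, ha]
      exact pvScanB_some cs length f (i+1) i (by omega) (by omega)
    · simp [pvScanB, pvScanA, hil, ha]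
      exact ih (i+1) (by omega) (by omega)

-- ===== VERDICT (by name: the statement is the Claim_ definition above) =====
theorem spellFindNextWord_spec : Claim_equal_spellFindNextWord := by
  intro utext index length _ _
  unfold Spec_spellFindNextWord spellFindNextWord spellFindNextWord_alt
  by_cases h : index ≤ length
  · exact (pvScanB_none utext.toList length _ index h rfl).symm
  · have : (length - index).toNat = 0 := by omega
    simp [this, pvScanA, pvScanB]
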